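-- pv_equiv track=rewrite | github.com/willianyamauti/Python-Exercises | Matrizes/EX8.py | calcular_totalPontos
-- ===== SOURCE A (Python) =====
-- def criarVetor(qtdElementos, valorPadrao):
--     vetor = [ ]
--     for i in range(qtdElementos):
--         vetor.append(valorPadrao)
--     return vetor
--
-- def calcular_totalPontos(matriz_pontos):
--     Pontos_porTime = criarVetor(len(matriz_pontos), 0)   # cria um vetor com a quantidade de produtos
--     for linha in range(len(matriz_pontos)):
--         for coluna in range(len(matriz_pontos[linha])):
--            if matriz_pontos[linha][coluna] == 0 or matriz_pontos[linha][coluna] == 1: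
--                if matriz_pontos[linha][coluna] == 0:
--                    Pontos_porTime[linha] += 1   #empate
--                else:
--                    Pontos_porTime[linha] += 3   #vitoria
--
--     return Pontos_porTime
-- ===== SOURCE B (Python) =====
-- def calcular_totalPontos(matriz_pontos):
--     return [linha.count(0) + 3 * linha.count(1) for linha in matriz_pontos]
-- ===== Notes on version B (the rewrite author's own statement) =====
-- stated objective: simpler
-- what changed: Replaces the index-driven nested loops that branch per cell and mutate a pre-built zero vector with a per-row closed form count(0) + 3*count(1) collected by a comprehension.
import Mathlib
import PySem

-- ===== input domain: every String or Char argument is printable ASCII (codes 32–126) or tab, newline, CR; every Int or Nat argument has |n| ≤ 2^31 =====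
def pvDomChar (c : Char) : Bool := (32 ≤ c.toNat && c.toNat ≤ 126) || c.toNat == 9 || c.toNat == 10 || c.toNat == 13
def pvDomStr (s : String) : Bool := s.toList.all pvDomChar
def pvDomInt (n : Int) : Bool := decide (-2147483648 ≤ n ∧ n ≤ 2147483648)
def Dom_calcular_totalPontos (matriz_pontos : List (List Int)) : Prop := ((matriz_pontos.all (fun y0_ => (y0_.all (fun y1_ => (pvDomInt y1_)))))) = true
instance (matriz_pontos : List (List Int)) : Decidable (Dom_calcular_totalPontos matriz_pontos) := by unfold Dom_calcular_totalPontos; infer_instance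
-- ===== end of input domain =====

-- B replaces A's index-driven nested loops (branching per cell and mutating a pre-built zero
-- vector) with a per-row closed form count(0) + 3*count(1) collected by a comprehension (simpler).

-- ===== PORT A =====
def criarVetor (qtdElementos : Nat) (valorPadrao : Int) : List Int :=
  (List.range qtdElementos).foldl (fun vetor _ => vetor ++ [valorPadrao]) []

def calcular_totalPontos (matriz_pontos : List (List Int)) : List Int :=
  let P0 := criarVetor matriz_pontos.length 0
  (List.range matriz_pontos.length).foldl (fun P linha =>
    let row := matriz_pontos.getD linha []   -- matriz_pontos[linha]: linha ∈ range(len), so getD is exact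
    (List.range row.length).foldl (fun P coluna =>
      let x := row.getD coluna 0             -- row[coluna]: coluna ∈ range(len(row)), so getD is exact
      if x = 0 ∨ x = 1 then
        if x = 0 then P.set linha (P.getD linha 0 + 1)
        else P.set linha (P.getD linha 0 + 3)
      else P) P) P0

-- ===== PORT B =====
def calcular_totalPontos_alt (matriz_pontos : List (List Int)) : List Int :=
  matriz_pontos.map (fun linha =>
    (PySem.List.count linha 0 : Int) + 3 * (PySem.List.count linha 1 : Int))

-- ===== PRECONDITION & SPEC =====
def Spec_calcular_totalPontos (matriz_pontos : List (List Int)) (out : List Int) : Prop := out = calcular_totalPontos_alt matriz_pontos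
instance (matriz_pontos : List (List Int)) (out : List Int) : Decidable (Spec_calcular_totalPontos matriz_pontos out) := by unfold Spec_calcular_totalPontos; infer_instance

-- ===== CLAIM (what is proved, stated in full; the proofs are below) =====
def Claim_equal_calcular_totalPontos : Prop := ∀ (matriz_pontos : List (List Int)), Dom_calcular_totalPontos matriz_pontos → Spec_calcular_totalPontos matriz_pontos (calcular_totalPontos matriz_pontos)

-- ===== LEMMAS AND PROOFS =====

-- per-row total that B computes
def rowPts (row : List Int) : Int :=
  (PySem.List.count row 0 : Int) + 3 * (PySem.List.count row 1 : Int)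

-- A's inner-loop step function (over the cell value)
def stepCell (linha : Nat) (P : List Int) (x : Int) : List Int :=
  if x = 0 ∨ x = 1 then
    if x = 0 then P.set linha (P.getD linha 0 + 1)
    else P.set linha (P.getD linha 0 + 3)
  else P

lemma criarVetor_eq (n : Nat) (v : Int) : criarVetor n v = List.replicate n v := by
  induction n with
  | zero => rfl
  | succ k ih =>
      simp only [criarVetor, List.range_succ, List.foldl_append, List.foldl_cons, List.foldl_nil]
      simp only [criarVetor] at ih
      rw [ih, List.replicate_succ']

-- fold over range-with-getD is fold over the list itself
lemma foldl_range_getD {β : Type} (row : List Int) (g : β → Int → β) (acc : β) :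
    (List.range row.length).foldl (fun b i => g b (row.getD i 0)) acc = row.foldl g acc := by
  induction row generalizing acc with
  | nil => rfl
  | cons x xs ih =>
      simp only [List.length_cons, List.range_succ_eq_map, List.foldl_cons, List.foldl_map,
        List.getD_cons_zero, List.getD_cons_succ]
      exact ih (g acc x)

lemma set_getD_self (P : List Int) (i : Nat) (h : i < P.length) :
    P.set i (P.getD i 0) = P := by
  rw [List.getD_eq_getElem P 0 h, List.set_getElem_self]

-- the inner loop adds rowPts row at index linha
lemma inner_loop_eq (row : List Int) : ∀ (P : List Int) (linha : Nat), linha < P.length →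
    row.foldl (stepCell linha) P = P.set linha (P.getD linha 0 + rowPts row) := by
  induction row with
  | nil =>
      intro P linha h
      have h0 : rowPts ([] : List Int) = 0 := by simp [rowPts, PySem.List.count_eq]
      rw [List.foldl_nil, h0, add_zero, set_getD_self P linha h]
  | cons x xs ih =>
      intro P linha h
      rcases eq_or_ne x 0 with h0 | h0
      · have hs : stepCell linha P x = P.set linha (P.getD linha 0 + 1) := by
          simp [stepCell, h0]
        rw [List.foldl_cons, hs, ih _ linha (by simpa using h)]
        rw [List.set_set, List.getD_eq_getElem _ 0 (by simpa using h),
          List.getElem_set_self]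
        have : rowPts (x :: xs) = 1 + rowPts xs := by
          simp [rowPts, PySem.List.count_eq, h0]
          ring
        rw [this]; ring_nf
      · rcases eq_or_ne x 1 with h1 | h1
        · have hs : stepCell linha P x = P.set linha (P.getD linha 0 + 3) := by
            simp [stepCell, h1]
          rw [List.foldl_cons, hs, ih _ linha (by simpa using h)]
          rw [List.set_set, List.getD_eq_getElem _ 0 (by simpa using h),
            List.getElem_set_self]
          have : rowPts (x :: xs) = 3 + rowPts xs := by
            simp [rowPts, PySem.List.count_eq, h1]
            ring
          rw [this]; ring_nf
        · have hs : stepCell linha P x = P := by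
            simp [stepCell, h0, h1]
          rw [List.foldl_cons, hs, ih P linha h]
          have : rowPts (x :: xs) = rowPts xs := by
            simp [rowPts, PySem.List.count_eq, h0, h1]
          rw [this]

-- the outer loop, once each row's inner loop is summarised by a set at its index
lemma foldl_set_range (f : Nat → Int) : ∀ (n : Nat) (P : List Int), n ≤ P.length →
    (List.range n).foldl (fun P i => P.set i (P.getD i 0 + f i)) P
      = (List.range n).map (fun i => P.getD i 0 + f i) ++ P.drop n := by
  intro n
  induction n with
  | zero => intro P _; simp
  | succ k ih =>
      intro P h
      have hk : k < P.length := by omega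
      rw [List.range_succ, List.foldl_append, List.foldl_cons, List.foldl_nil,
        ih P (by omega)]
      have hdrop : P.drop k = P[k] :: P.drop (k + 1) := (List.getElem_cons_drop hk).symm
      have hlen : ((List.range k).map (fun i => P.getD i 0 + f i)).length = k := by simp
      rw [hdrop, List.getD_append_right _ _ _ _ hlen.le, List.set_append_right _ _ hlen.le]
      simp only [hlen, Nat.sub_self, List.getD_cons_zero, List.set_cons_zero]
      simp [List.map_append, List.getElem?_eq_getElem hk]

-- fold with the real inner loops equals fold with the set-summary, for in-range indices
lemma fold_rows_eq (m : List (List Int)) : ∀ (l : List Nat) (P : List Int),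
    (∀ i ∈ l, i < P.length) →
    l.foldl (fun P linha =>
        (List.range (m.getD linha []).length).foldl
          (fun P coluna => stepCell linha P ((m.getD linha []).getD coluna 0)) P) P
      = l.foldl (fun P i => P.set i (P.getD i 0 + rowPts (m.getD i []))) P := by
  intro l
  induction l with
  | nil => intro P _; rfl
  | cons i is ih =>
      intro P h
      have hi : i < P.length := h i (by simp)
      rw [List.foldl_cons, List.foldl_cons,
        foldl_range_getD (m.getD i []) (stepCell i) P, inner_loop_eq _ P i hi]
      exact ih _ (fun j hj => by
        rw [List.length_set]; exact h j (List.mem_cons_of_mem _ hj))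

lemma map_range_getD {α β : Type} [Inhabited α] (l : List α) (f : α → β) (d : α) :
    (List.range l.length).map (fun i => f (l.getD i d)) = l.map f := by
  induction l with
  | nil => rfl
  | cons x xs ih =>
      simp only [List.length_cons, List.range_succ_eq_map, List.map_cons, List.map_map,
        List.getD_cons_zero, List.map]
      exact congrArg _ (by simpa [Function.comp] using ih)

-- ===== VERDICT (by name: the statement is the Claim_ definition above) =====
theorem calcular_totalPontos_spec : Claim_equal_calcular_totalPontos := by
  intro m _
  unfold Spec_calcular_totalPontos calcular_totalPontos calcular_totalPontos_alt
  have h1 : criarVetor m.length 0 = List.replicate m.length 0 := criarVetor_eq _ _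
  rw [h1]
  have h2 := fold_rows_eq m (List.range m.length) (List.replicate m.length (0 : Int))
    (by intro i hi; simp_all [List.mem_range])
  simp only [stepCell] at h2
  rw [h2, foldl_set_range (fun i => rowPts (m.getD i [])) m.length
    (List.replicate m.length (0 : Int)) (by simp)]
  simp only [List.drop_replicate, Nat.sub_self, List.replicate_zero, List.append_nil]
  have h3 : ∀ i ∈ List.range m.length,
      (List.replicate m.length (0 : Int)).getD i 0 + rowPts (m.getD i [])
        = rowPts (m.getD i []) := by
    intro i hi
    rw [List.getD_eq_getElem _ 0 (by simpa using List.mem_range.mp hi)]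
    simp
  rw [List.map_congr_left h3, map_range_getD m rowPts []]
  rfl
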